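-- pv_equiv track=rewrite | github.com/NeelJVerma/Kattis_Solutions | Nine_Knights/nineknights.py | is_board_valid
-- ===== SOURCE A (Python) =====
-- movex = [-2, -1, 1, 2, 2, 1, -1, -2]
--
-- movey = [-1, -2, -2, -1, 1, 2, 2, 1]
--
-- def is_knight_valid(matrix, i, j):
--     for idx in range(8):
--         x = i + movex[idx]
--         y = j + movey[idx]
--
--         if movex[idx] < 0 and movey[idx] < 0:
--             if x >= 0 and y >= 0:
--                 if matrix[x][y] == 'k':
--                     return False
--         elif movex[idx] > 0 and movey[idx] < 0:
--             if x < 5 and y >= 0: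
--                 if matrix[x][y] == 'k':
--                     return False
--         elif movex[idx] > 0 and movey[idx] > 0:
--             if x < 5 and y < 5:
--                 if matrix[x][y] == 'k':
--                     return False
--         elif movex[idx] < 0 and movey[idx] > 0:
--             if x >= 0 and y < 5:
--                 if matrix[x][y] == 'k':
--                     return False
--
--     return True
--
-- def is_board_valid(matrix):
--     count = 0
--
--     for i in range(5):
--         for j in range(5):
--             if matrix[i][j] == 'k':
--                 if is_knight_valid(matrix, i, j):
--                     count += 1
--
--     return count == 9
-- ===== SOURCE B (Python) =====
-- OFFSETS = [(-2, -1), (-1, -2), (-2, 1), (-1, 2), (1, -2), (2, -1), (1, 2), (2, 1)]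
--
-- def is_board_valid(matrix):
--     attacked = set()
--     for i in range(5):
--         for j in range(5):
--             if matrix[i][j] == 'k':
--                 for dx, dy in OFFSETS:
--                     attacked.add((i + dx, j + dy))
--     count = 0
--     for i in range(5):
--         for j in range(5):
--             if matrix[i][j] == 'k' and (i, j) not in attacked:
--                 count += 1
--     return count == 9
-- ===== Notes on version B (the rewrite author's own statement) =====
-- stated objective: alternative
-- what changed: Replaces A's per-knight scan of 8 bounds-checked neighbour cells with a two-pass algorithm: one pass builds a set of all knight-attacked coordinates (no bounds checks, relying on knight-move symmetry), a second pass counts knights whose own cell is not in that set.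
import Mathlib
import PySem

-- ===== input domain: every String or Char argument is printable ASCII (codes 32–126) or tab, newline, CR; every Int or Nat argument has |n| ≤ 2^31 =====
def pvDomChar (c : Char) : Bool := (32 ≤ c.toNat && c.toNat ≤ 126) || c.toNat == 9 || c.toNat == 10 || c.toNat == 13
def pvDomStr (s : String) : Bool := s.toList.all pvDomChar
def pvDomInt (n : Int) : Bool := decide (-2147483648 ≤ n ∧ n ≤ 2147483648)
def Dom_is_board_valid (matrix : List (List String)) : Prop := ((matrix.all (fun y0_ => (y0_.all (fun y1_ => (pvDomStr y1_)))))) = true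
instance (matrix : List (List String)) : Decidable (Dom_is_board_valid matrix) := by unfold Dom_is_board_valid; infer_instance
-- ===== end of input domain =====

-- B replaces A's per-knight bounds-checked neighbour scan by one pass that indexes every
-- attacked cell in a set, then a counting pass (alternative decomposition, same cost).

-- matrix[x][y] (both Pythons index the same way; total form, exact under Pre_)
def pvCell (matrix : List (List String)) (x y : Int) : String :=
  PySem.List.pyGetD (PySem.List.pyGetD matrix x []) y ""

-- ===== PORT A =====
def movex : List Int := [-2, -1, 1, 2, 2, 1, -1, -2]
def movey : List Int := [-1, -2, -2, -1, 1, 2, 2, 1]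

def is_knight_valid (matrix : List (List String)) (i j : Int) : Bool :=
  (PySem.List.pyRange 0 8 1).all (fun idx =>
    let mx := PySem.List.pyGetD movex idx 0
    let my := PySem.List.pyGetD movey idx 0
    let x := i + mx
    let y := j + my
    if mx < 0 ∧ my < 0 then
      if 0 ≤ x ∧ 0 ≤ y then pvCell matrix x y ≠ "k" else true
    else if mx > 0 ∧ my < 0 then
      if x < 5 ∧ 0 ≤ y then pvCell matrix x y ≠ "k" else true
    else if mx > 0 ∧ my > 0 then
      if x < 5 ∧ y < 5 then pvCell matrix x y ≠ "k" else true
    else if mx < 0 ∧ my > 0 then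
      if 0 ≤ x ∧ y < 5 then pvCell matrix x y ≠ "k" else true
    else true)

def is_board_valid (matrix : List (List String)) : Bool :=
  ((PySem.List.pyRange 0 5 1).foldl (fun c i =>
    (PySem.List.pyRange 0 5 1).foldl (fun c j =>
      if pvCell matrix i j = "k" then
        if is_knight_valid matrix i j then c + 1 else c
      else c) c) (0 : Int)) = 9

-- ===== PORT B =====
def pvOffsets : List (Int × Int) :=
  [(-2, -1), (-1, -2), (-2, 1), (-1, 2), (1, -2), (2, -1), (1, 2), (2, 1)]

def pvAttacked (matrix : List (List String)) : PySem.Set (Int × Int) :=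
  (PySem.List.pyRange 0 5 1).foldl (fun s i =>
    (PySem.List.pyRange 0 5 1).foldl (fun s j =>
      if pvCell matrix i j = "k" then
        pvOffsets.foldl (fun s d => PySem.Set.add s (i + d.1, j + d.2)) s
      else s) s) PySem.Set.empty

def is_board_valid_alt (matrix : List (List String)) : Bool :=
  let attacked := pvAttacked matrix
  ((PySem.List.pyRange 0 5 1).foldl (fun c i =>
    (PySem.List.pyRange 0 5 1).foldl (fun c j =>
      if pvCell matrix i j = "k" ∧ ¬ (i, j) ∈ attacked then c + 1 else c) c) (0 : Int)) = 9

-- ===== PRECONDITION & SPEC =====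
-- A indexes matrix[i][j] for all 0 ≤ i, j < 5: it raises IndexError unless there are
-- at least 5 rows and each of the first 5 rows has at least 5 entries.
def Pre_is_board_valid (matrix : List (List String)) : Prop :=
  5 ≤ matrix.length ∧ ∀ row ∈ matrix.take 5, 5 ≤ row.length
instance (matrix : List (List String)) : Decidable (Pre_is_board_valid matrix) := by
  unfold Pre_is_board_valid; infer_instance

def pvWitness_is_board_valid : List (List String) :=
  [["k", ".", "k", ".", "k"],
   [".", ".", ".", ".", "."],
   ["k", ".", "k", ".", "k"],
   [".", ".", ".", ".", "."],
   ["k", ".", "k", ".", "k"]]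

def Spec_is_board_valid (matrix : List (List String)) (out : Bool) : Prop := out = is_board_valid_alt matrix
instance (matrix : List (List String)) (out : Bool) : Decidable (Spec_is_board_valid matrix out) := by unfold Spec_is_board_valid; infer_instance

-- ===== CLAIM (what is proved, stated in full; the proofs are below) =====
def Claim_equal_is_board_valid : Prop := ∀ (matrix : List (List String)), Dom_is_board_valid matrix → Pre_is_board_valid matrix → Spec_is_board_valid matrix (is_board_valid matrix)

-- ===== LEMMAS AND PROOFS =====

-- membership in the attacked set built by B's nested loops
theorem mem_attacked_cols (matrix : List (List String)) (i : Int) (cols : List Int)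
    (s : PySem.Set (Int × Int)) (p : Int × Int) :
    p ∈ cols.foldl (fun s j =>
      if pvCell matrix i j = "k" then
        pvOffsets.foldl (fun s d => PySem.Set.add s (i + d.1, j + d.2)) s
      else s) s ↔
    p ∈ s ∨ ∃ j ∈ cols, pvCell matrix i j = "k" ∧ ∃ d ∈ pvOffsets, p = (i + d.1, j + d.2) := by
  induction cols generalizing s with
  | nil => simp
  | cons j t ih =>
    simp only [List.foldl_cons, ih]
    by_cases h : pvCell matrix i j = "k" <;>
      simp [h, PySem.Set.mem_foldl_add, or_assoc]

theorem mem_attacked (matrix : List (List String)) (p : Int × Int) :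
    p ∈ pvAttacked matrix ↔
    ∃ i ∈ PySem.List.pyRange 0 5 1, ∃ j ∈ PySem.List.pyRange 0 5 1,
      pvCell matrix i j = "k" ∧ ∃ d ∈ pvOffsets, p = (i + d.1, j + d.2) := by
  unfold pvAttacked
  generalize (PySem.List.pyRange 0 5 1) = R
  rw [show (PySem.Set.empty : PySem.Set (Int × Int)) = [] from rfl]
  have : ∀ (rows : List Int) (s : PySem.Set (Int × Int)),
      p ∈ rows.foldl (fun s i => (R.foldl (fun s j =>
        if pvCell matrix i j = "k" then
          pvOffsets.foldl (fun s d => PySem.Set.add s (i + d.1, j + d.2)) s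
        else s) s)) s ↔
      p ∈ s ∨ ∃ i ∈ rows, ∃ j ∈ R, pvCell matrix i j = "k" ∧
        ∃ d ∈ pvOffsets, p = (i + d.1, j + d.2) := by
    intro rows
    induction rows with
    | nil => simp
    | cons r t ih =>
      intro s
      simp only [List.foldl_cons, ih, mem_attacked_cols, or_assoc]
      simp
  simpa using this R []

-- the key per-cell fact: a knight at (i,j) passes A's scan iff (i,j) is not in B's attacked set
theorem knight_iff_not_attacked (matrix : List (List String)) (i j : Int)
    (hi0 : 0 ≤ i) (hi5 : i < 5) (hj0 : 0 ≤ j) (hj5 : j < 5) :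
    is_knight_valid matrix i j = true ↔ ¬ (i, j) ∈ pvAttacked matrix := by
  rw [mem_attacked]
  unfold is_knight_valid
  rw [show PySem.List.pyRange 0 8 1 = [0,1,2,3,4,5,6,7] from by decide]
  simp only [List.all_cons, List.all_nil, Bool.and_eq_true]
  norm_num [movex, movey, PySem.List.pyGetD, PySem.List.pyGet?, PySem.List.pyIdx?,
    show Int.toNat 2 = 2 from rfl, show Int.toNat 3 = 3 from rfl, show Int.toNat 4 = 4 from rfl,
    show Int.toNat 5 = 5 from rfl, show Int.toNat 6 = 6 from rfl, show Int.toNat 7 = 7 from rfl,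
    List.getElem_cons_succ, List.getElem_cons_zero]
  constructor
  · rintro ⟨h1, h2, h3, h4, h5, h6, h7, h8⟩ i' hi'0 hi'5 j' hj'0 hj'5 hc a b hd e1 e2
    fin_cases hd
    · rcases h5 with h | h
      · omega
      · exact h (by rw [show i + 2 = i' from by omega, show j + 1 = j' from by omega]; exact hc)
    · rcases h6 with h | h
      · omega
      · exact h (by rw [show i + 1 = i' from by omega, show j + 2 = j' from by omega]; exact hc)
    · rcases h4 with h | h
      · omega
      · exact h (by rw [show i + 2 = i' from by omega, show j + -1 = j' from by omega]; exact hc)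
    · rcases h3 with h | h
      · omega
      · exact h (by rw [show i + 1 = i' from by omega, show j + -2 = j' from by omega]; exact hc)
    · rcases h7 with h | h
      · omega
      · exact h (by rw [show i + -1 = i' from by omega, show j + 2 = j' from by omega]; exact hc)
    · rcases h8 with h | h
      · omega
      · exact h (by rw [show i + -2 = i' from by omega, show j + 1 = j' from by omega]; exact hc)
    · rcases h2 with h | h
      · omega
      · exact h (by rw [show i + -1 = i' from by omega, show j + -2 = j' from by omega]; exact hc)
    · rcases h1 with h | h
      · omega
      · exact h (by rw [show i + -2 = i' from by omega, show j + -1 = j' from by omega]; exact hc)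
  · intro h
    refine ⟨?_, ?_, ?_, ?_, ?_, ?_, ?_, ?_⟩
    · rw [or_iff_not_imp_left, not_or]
      intro hb hcell
      exact h (i + -2) (by omega) (by omega) (j + -1) (by omega) (by omega) hcell (2) (1) (by decide) (by omega) (by omega)
    · rw [or_iff_not_imp_left, not_or]
      intro hb hcell
      exact h (i + -1) (by omega) (by omega) (j + -2) (by omega) (by omega) hcell (1) (2) (by decide) (by omega) (by omega)
    · rw [or_iff_not_imp_left, not_or]
      intro hb hcell
      exact h (i + 1) (by omega) (by omega) (j + -2) (by omega) (by omega) hcell (-1) (2) (by decide) (by omega) (by omega)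
    · rw [or_iff_not_imp_left, not_or]
      intro hb hcell
      exact h (i + 2) (by omega) (by omega) (j + -1) (by omega) (by omega) hcell (-2) (1) (by decide) (by omega) (by omega)
    · rw [or_iff_not_imp_left, not_or]
      intro hb hcell
      exact h (i + 2) (by omega) (by omega) (j + 1) (by omega) (by omega) hcell (-2) (-1) (by decide) (by omega) (by omega)
    · rw [or_iff_not_imp_left, not_or]
      intro hb hcell
      exact h (i + 1) (by omega) (by omega) (j + 2) (by omega) (by omega) hcell (-1) (-2) (by decide) (by omega) (by omega)
    · rw [or_iff_not_imp_left, not_or]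
      intro hb hcell
      exact h (i + -1) (by omega) (by omega) (j + 2) (by omega) (by omega) hcell (1) (-2) (by decide) (by omega) (by omega)
    · rw [or_iff_not_imp_left, not_or]
      intro hb hcell
      exact h (i + -2) (by omega) (by omega) (j + 1) (by omega) (by omega) hcell (2) (-1) (by decide) (by omega) (by omega)

theorem counts_eq (matrix : List (List String)) :
    ((PySem.List.pyRange 0 5 1).foldl (fun c i =>
      (PySem.List.pyRange 0 5 1).foldl (fun c j =>
        if pvCell matrix i j = "k" then
          if is_knight_valid matrix i j then c + 1 else c
        else c) c) (0 : Int)) =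
    ((PySem.List.pyRange 0 5 1).foldl (fun c i =>
      (PySem.List.pyRange 0 5 1).foldl (fun c j =>
        if pvCell matrix i j = "k" ∧ ¬ (i, j) ∈ pvAttacked matrix then c + 1 else c) c)
      (0 : Int)) := by
  apply PySem.List.foldl_congr_mem
  intro c i hi
  apply PySem.List.foldl_congr_mem
  intro c j hj
  rw [PySem.List.mem_pyRange_one] at hi hj
  have hk := knight_iff_not_attacked matrix i j hi.1 hi.2 hj.1 hj.2
  by_cases hc : pvCell matrix i j = "k" <;>
    by_cases ha : (i, j) ∈ pvAttacked matrix <;>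
    simp_all

-- ===== VERDICT (by name: the statement is the Claim_ definition above) =====
theorem is_board_valid_spec : Claim_equal_is_board_valid := by
  intro matrix _ _
  unfold Spec_is_board_valid is_board_valid is_board_valid_alt
  rw [counts_eq]
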